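-- pv_equiv track=rewrite | github.com/DariuszNewecki/CORE | src/will/tools/module_descriptor.py | _describe_utils
-- ===== SOURCE A (Python) =====
-- def _describe_utils(files: list[str]) -> str:
--     """Generate description for utility modules based on files."""
--     file_themes = []
--
--     if any("path" in f.lower() for f in files):
--         file_themes.append("file path operations")
--     if any("json" in f.lower() or "yaml" in f.lower() for f in files):
--         file_themes.append("data format parsing")
--     if any("text" in f.lower() or "string" in f.lower() for f in files):
--         file_themes.append("text processing")
--     if any("time" in f.lower() or "date" in f.lower() for f in files):
--         file_themes.append("date/time utilities")
--
--     if file_themes: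
--         themes = ", ".join(file_themes)
--         return (
--             f"Pure utility functions for {themes}. "
--             f"Stateless helpers with no business logic or external dependencies. "
--             f"Reusable across all layers."
--         )
--     else:
--         return (
--             "Generic utility functions and helpers. "
--             "Pure, stateless functions with no side effects. "
--             "Simple operations like string manipulation, data conversion."
--         )
-- ===== SOURCE B (Python) =====
-- def _describe_utils(files: list[str]) -> str:
--     """Generate description for utility modules based on files."""
--     has_path = has_data = has_text = has_time = False
--     for f in files:
--         low = f.lower()
--         has_path = has_path or "path" in low
--         has_data = has_data or "json" in low or "yaml" in low
--         has_text = has_text or "text" in low or "string" in low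
--         has_time = has_time or "time" in low or "date" in low
--
--     file_themes = []
--     if has_path:
--         file_themes.append("file path operations")
--     if has_data:
--         file_themes.append("data format parsing")
--     if has_text:
--         file_themes.append("text processing")
--     if has_time:
--         file_themes.append("date/time utilities")
--
--     if file_themes:
--         return (
--             "Pure utility functions for " + ", ".join(file_themes) + ". "
--             "Stateless helpers with no business logic or external dependencies. "
--             "Reusable across all layers."
--         )
--     return (
--         "Generic utility functions and helpers. "
--         "Pure, stateless functions with no side effects. "
--         "Simple operations like string manipulation, data conversion."
--     )
-- ===== Notes on version B (the rewrite author's own statement) =====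
-- stated objective: faster
-- what changed: Replaces A's four separate any() scans over files with one single pass that lowercases each filename once and OR-accumulates four boolean theme flags, building the theme list afterwards.
import Mathlib
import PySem

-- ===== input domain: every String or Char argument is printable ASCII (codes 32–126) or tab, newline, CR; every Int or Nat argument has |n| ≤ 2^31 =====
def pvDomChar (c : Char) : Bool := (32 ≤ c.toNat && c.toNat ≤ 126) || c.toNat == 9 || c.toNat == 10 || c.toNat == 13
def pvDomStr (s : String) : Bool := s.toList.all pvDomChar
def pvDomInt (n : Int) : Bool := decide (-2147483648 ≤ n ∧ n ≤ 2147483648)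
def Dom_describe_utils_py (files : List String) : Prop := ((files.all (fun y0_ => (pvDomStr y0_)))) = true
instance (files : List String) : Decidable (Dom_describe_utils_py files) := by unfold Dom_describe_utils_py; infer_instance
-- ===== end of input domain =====

-- B replaces A's four separate any() scans with one accumulating pass (lowercase once, four OR-flags); same output, alternative decomposition.


-- ===== PORT A =====
def describe_utils_py (files : List String) : String :=
  let ft0 : List String := []
  let ft1 := if files.any (fun f => PySem.Str.isIn "path" (PySem.Str.lower f))
             then ft0 ++ ["file path operations"] else ft0
  let ft2 := if files.any (fun f => PySem.Str.isIn "json" (PySem.Str.lower f) || PySem.Str.isIn "yaml" (PySem.Str.lower f))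
             then ft1 ++ ["data format parsing"] else ft1
  let ft3 := if files.any (fun f => PySem.Str.isIn "text" (PySem.Str.lower f) || PySem.Str.isIn "string" (PySem.Str.lower f))
             then ft2 ++ ["text processing"] else ft2
  let ft4 := if files.any (fun f => PySem.Str.isIn "time" (PySem.Str.lower f) || PySem.Str.isIn "date" (PySem.Str.lower f))
             then ft3 ++ ["date/time utilities"] else ft3
  if ft4 ≠ [] then
    let themes := PySem.Str.join ", " ft4
    "Pure utility functions for " ++ themes ++ ". Stateless helpers with no business logic or external dependencies. Reusable across all layers."
  else
    "Generic utility functions and helpers. Pure, stateless functions with no side effects. Simple operations like string manipulation, data conversion."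

-- ===== PORT B =====
def describe_utils_py_alt (files : List String) : String :=
  let flags := files.foldl
    (fun (st : Bool × Bool × Bool × Bool) f =>
      let low := PySem.Str.lower f
      (st.1 || PySem.Str.isIn "path" low,
       st.2.1 || PySem.Str.isIn "json" low || PySem.Str.isIn "yaml" low,
       st.2.2.1 || PySem.Str.isIn "text" low || PySem.Str.isIn "string" low,
       st.2.2.2 || PySem.Str.isIn "time" low || PySem.Str.isIn "date" low))
    (false, false, false, false)
  let t0 : List String := []
  let t1 := if flags.1 then t0 ++ ["file path operations"] else t0
  let t2 := if flags.2.1 then t1 ++ ["data format parsing"] else t1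
  let t3 := if flags.2.2.1 then t2 ++ ["text processing"] else t2
  let t4 := if flags.2.2.2 then t3 ++ ["date/time utilities"] else t3
  if t4 ≠ [] then
    "Pure utility functions for " ++ PySem.Str.join ", " t4 ++ ". Stateless helpers with no business logic or external dependencies. Reusable across all layers."
  else
    "Generic utility functions and helpers. Pure, stateless functions with no side effects. Simple operations like string manipulation, data conversion."

-- ===== PRECONDITION & SPEC =====
def Spec_describe_utils_py (files : List String) (out : String) : Prop := out = describe_utils_py_alt files
instance (files : List String) (out : String) : Decidable (Spec_describe_utils_py files out) := by unfold Spec_describe_utils_py; infer_instance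

-- ===== CLAIM (what is proved, stated in full; the proofs are below) =====
def Claim_equal_describe_utils_py : Prop := ∀ (files : List String), Dom_describe_utils_py files → Spec_describe_utils_py files (describe_utils_py files)

-- ===== LEMMAS AND PROOFS =====

-- B's single fold computes exactly the four any-scans of A.
theorem flags_eq (files : List String) (a b c d : Bool) :
    files.foldl
      (fun (st : Bool × Bool × Bool × Bool) f =>
        let low := PySem.Str.lower f
        (st.1 || PySem.Str.isIn "path" low,
         st.2.1 || PySem.Str.isIn "json" low || PySem.Str.isIn "yaml" low,
         st.2.2.1 || PySem.Str.isIn "text" low || PySem.Str.isIn "string" low,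
         st.2.2.2 || PySem.Str.isIn "time" low || PySem.Str.isIn "date" low))
      (a, b, c, d)
    = (a || files.any (fun f => PySem.Str.isIn "path" (PySem.Str.lower f)),
       b || files.any (fun f => PySem.Str.isIn "json" (PySem.Str.lower f) || PySem.Str.isIn "yaml" (PySem.Str.lower f)),
       c || files.any (fun f => PySem.Str.isIn "text" (PySem.Str.lower f) || PySem.Str.isIn "string" (PySem.Str.lower f)),
       d || files.any (fun f => PySem.Str.isIn "time" (PySem.Str.lower f) || PySem.Str.isIn "date" (PySem.Str.lower f))) := by
  induction files generalizing a b c d with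
  | nil => simp
  | cons f t ih =>
      simp only [List.foldl_cons, List.any_cons, ih]
      simp [Bool.or_assoc]

-- ===== VERDICT (by name: the statement is the Claim_ definition above) =====
theorem describe_utils_py_spec : Claim_equal_describe_utils_py := by
  intro files _
  show describe_utils_py files = describe_utils_py_alt files
  unfold describe_utils_py describe_utils_py_alt
  rw [flags_eq]
  simp
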